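-- pv_equiv track=rewrite | github.com/AmiraliQdi/Ping-Reader | PingViewerReader/src/Reader.py | extract_custom_samples
-- ===== SOURCE A (Python) =====
-- def extract_custom_samples(input_data, indexing):
--     """Extract custom samples from input data."""
--     output_data = []
--     for i in range(len(input_data) // indexing):
--         temp_list = 0
--         for j in range(indexing):
--             temp_list += input_data[j + (i * indexing)]
--         temp_list //= indexing
--         output_data.append(temp_list)
--     return output_data
-- ===== SOURCE B (Python) =====
-- def extract_custom_samples(input_data, indexing):
--     """Extract custom samples from input data."""
--     prefix = [0]
--     for x in input_data:
--         prefix.append(prefix[-1] + x)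
--     return [(prefix[(i + 1) * indexing] - prefix[i * indexing]) // indexing
--             for i in range(len(input_data) // indexing)]
-- ===== Notes on version B (the rewrite author's own statement) =====
-- stated objective: alternative
-- what changed: Replaces the nested per-block accumulation loop with a single prefix-sum pass followed by one index-difference pass per block.
import Mathlib
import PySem

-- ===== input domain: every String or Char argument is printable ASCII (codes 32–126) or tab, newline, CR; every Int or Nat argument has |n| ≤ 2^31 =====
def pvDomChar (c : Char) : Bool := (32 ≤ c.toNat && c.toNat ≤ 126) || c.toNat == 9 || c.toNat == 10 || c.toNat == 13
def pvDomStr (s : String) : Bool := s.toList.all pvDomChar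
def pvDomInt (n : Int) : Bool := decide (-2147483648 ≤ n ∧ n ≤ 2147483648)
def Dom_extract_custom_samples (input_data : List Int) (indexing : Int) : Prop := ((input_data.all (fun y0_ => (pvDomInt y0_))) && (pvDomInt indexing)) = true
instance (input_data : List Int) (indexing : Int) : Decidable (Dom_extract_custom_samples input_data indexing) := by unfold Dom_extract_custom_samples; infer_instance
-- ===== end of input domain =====

-- B computes the block averages from one prefix-sum list instead of A's nested per-block loop; alternative decomposition, same cost.

-- ===== PORT A =====
-- for i in range(len(input_data)//indexing): temp=0; for j in range(indexing): temp += input_data[j+i*indexing]; temp //= indexing; append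
def extract_custom_samples (input_data : List Int) (indexing : Int) : List Int :=
  (PySem.List.pyRange 0 (PySem.Int.floordiv (input_data.length : Int) indexing) 1).foldl
    (fun output_data i =>
      let temp_list :=
        (PySem.List.pyRange 0 indexing 1).foldl
          (fun t j => t + PySem.List.pyGetD input_data (j + i * indexing) 0) 0
      output_data ++ [PySem.Int.floordiv temp_list indexing]) []

-- ===== PORT B =====
-- prefix = [0]; for x in input_data: prefix.append(prefix[-1] + x)
def pvPrefix (input_data : List Int) : List Int :=
  input_data.foldl (fun p x => p ++ [PySem.List.pyGetD p (-1) 0 + x]) [0]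

-- [(prefix[(i+1)*indexing] - prefix[i*indexing]) // indexing for i in range(len(input_data)//indexing)]
def extract_custom_samples_alt (input_data : List Int) (indexing : Int) : List Int :=
  let pre := pvPrefix input_data
  (PySem.List.pyRange 0 (PySem.Int.floordiv (input_data.length : Int) indexing) 1).map
    (fun i => PySem.Int.floordiv
        (PySem.List.pyGetD pre ((i + 1) * indexing) 0 - PySem.List.pyGetD pre (i * indexing) 0)
        indexing)

-- ===== PRECONDITION & SPEC =====
-- Pre_ excludes only indexing = 0, where Python A raises ZeroDivisionError (B raises there too).
def Pre_extract_custom_samples (input_data : List Int) (indexing : Int) : Prop := indexing ≠ 0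
instance (input_data : List Int) (indexing : Int) : Decidable (Pre_extract_custom_samples input_data indexing) := by unfold Pre_extract_custom_samples; infer_instance
def pvWitness_extract_custom_samples : List Int × Int := ([1, 2, 3, 4, 5], 2)

def Spec_extract_custom_samples (input_data : List Int) (indexing : Int) (out : List Int) : Prop := out = extract_custom_samples_alt input_data indexing
instance (input_data : List Int) (indexing : Int) (out : List Int) : Decidable (Spec_extract_custom_samples input_data indexing out) := by unfold Spec_extract_custom_samples; infer_instance

-- ===== CLAIM (what is proved, stated in full; the proofs are below) =====
def Claim_equal_extract_custom_samples : Prop := ∀ (input_data : List Int) (indexing : Int), Dom_extract_custom_samples input_data indexing → Pre_extract_custom_samples input_data indexing → Spec_extract_custom_samples input_data indexing (extract_custom_samples input_data indexing)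

-- ===== LEMMAS AND PROOFS =====

-- the prefix fold, started from any list whose last element is s, appends the running sums
lemma pvPrefix_fold (l : List Int) (p : List Int) (s : Int)
    (h : PySem.List.pyGetD p (-1) 0 = s) :
    l.foldl (fun p x => p ++ [PySem.List.pyGetD p (-1) 0 + x]) p
      = p ++ (List.range l.length).map (fun t => s + (l.take (t + 1)).sum) := by
  induction l generalizing p s with
  | nil => simp
  | cons x xs ih =>
    simp only [List.foldl_cons, h]
    rw [ih (p ++ [s + x]) (s + x)
      (by simp [PySem.List.pyGetD, PySem.List.pyGet?, PySem.List.pyIdx?])]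
    simp only [List.length_cons, List.range_succ_eq_map, List.map_cons, List.map_map]
    simp [List.append_assoc, List.take_succ_cons, Function.comp_def, add_assoc]

lemma pvPrefix_eq (l : List Int) :
    pvPrefix l = 0 :: (List.range l.length).map (fun t => (l.take (t + 1)).sum) := by
  have := pvPrefix_fold l [0] 0 (by decide)
  simpa [pvPrefix] using this

-- indexing into the prefix list gives the sum of the first m elements
lemma pvPrefix_get (l : List Int) (m : Int) (h0 : 0 ≤ m) (h1 : m ≤ (l.length : Int)) :
    PySem.List.pyGetD (pvPrefix l) m 0 = (l.take m.toNat).sum := by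
  rw [pvPrefix_eq]
  obtain ⟨mn, rfl⟩ : ∃ mn : Nat, m = (mn : Int) := ⟨m.toNat, (Int.toNat_of_nonneg h0).symm⟩
  rw [PySem.List.pyGetD_natCast]
  cases mn with
  | zero => simp
  | succ t =>
    have ht : t < l.length := by exact_mod_cast (by omega : (t : Int) < (l.length : Int))
    simp [List.getD, ht]

-- the inner per-block loop sums a contiguous slice of the input
lemma pvInnerSum (l : List Int) (a : Int) (K : Nat) (ha : 0 ≤ a)
    (hb : a + (K : Int) ≤ (l.length : Int)) :
    (PySem.List.pyRange 0 (K : Int) 1).foldl (fun t j => t + PySem.List.pyGetD l (j + a) 0) 0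
      = ((l.drop a.toNat).take K).sum := by
  induction K with
  | zero => simp [PySem.List.pyRange_one_eq_nil]
  | succ K ih =>
    have hrange : PySem.List.pyRange 0 ((K : Int) + 1) 1
        = PySem.List.pyRange 0 (K : Int) 1 ++ [(K : Int)] := by
      simpa using PySem.List.pyRange_one_succ_right (a := 0) (b := (K : Int)) (by positivity)
    have hidx : a.toNat + K < l.length := by omega
    have hgD : PySem.List.pyGetD l ((K : Int) + a) 0 = l[a.toNat + K] := by
      rw [PySem.List.pyGetD_eq_getElem l 0 (by omega) (by omega)]
      congr 1
      omega
    have hdropK : K < (l.drop a.toNat).length := by simp; omega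
    rw [show ((K + 1 : Nat) : Int) = (K : Int) + 1 from by omega, hrange, List.foldl_append]
    simp only [List.foldl_cons, List.foldl_nil]
    rw [ih (by omega), hgD, List.sum_take_succ _ _ hdropK, List.getElem_drop]

-- k < 0 ⟹ the block count len // k is ≤ 0 (so both loops are empty)
lemma floordiv_nonpos_of_neg (n k : Int) (hn : 0 ≤ n) (hk : k < 0) :
    PySem.Int.floordiv n k ≤ 0 := by
  have hmul := PySem.Int.floordiv_mul_add_mod n k
  have hr := (PySem.Int.mod_neg_bounds n hk).2
  by_contra hq
  have hq' : 0 < PySem.Int.floordiv n k := by omega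
  have : PySem.Int.floordiv n k * k < 0 := mul_neg_of_pos_of_neg hq' hk
  omega

-- ===== VERDICT (by name: the statement is the Claim_ definition above) =====
theorem extract_custom_samples_spec : Claim_equal_extract_custom_samples := by
  intro l k _ hk
  unfold Spec_extract_custom_samples extract_custom_samples extract_custom_samples_alt
  rcases lt_or_gt_of_ne hk with hneg | hpos
  · have hnil : PySem.List.pyRange 0 (PySem.Int.floordiv (l.length : Int) k) 1 = [] :=
      PySem.List.pyRange_one_eq_nil (floordiv_nonpos_of_neg (l.length : Int) k (by positivity) hneg)
    rw [hnil]
    simp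
  · rw [PySem.List.foldl_append_singleton_eq_map, List.nil_append]
    refine List.map_congr_left (fun i hi => ?_)
    rw [PySem.List.mem_pyRange_one] at hi
    obtain ⟨hi0, hi1⟩ := hi
    have hik : 0 ≤ i * k := mul_nonneg hi0 (le_of_lt hpos)
    have hlen : (i + 1) * k ≤ (l.length : Int) :=
      (PySem.Int.le_floordiv_iff_mul_le hpos).mp (by omega)
    have hK : k = (k.toNat : Int) := (Int.toNat_of_nonneg (le_of_lt hpos)).symm
    have hinner : (PySem.List.pyRange 0 k 1).foldl
        (fun t j => t + PySem.List.pyGetD l (j + i * k) 0) 0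
        = ((l.drop (i * k).toNat).take k.toNat).sum := by
      have hik2 : i * k + (k.toNat : Int) ≤ (l.length : Int) := by
        rw [← hK]; nlinarith [hlen]
      have h := pvInnerSum l (i * k) k.toNat hik hik2
      rw [← hK] at h
      exact h
    have hsub : ((i + 1) * k).toNat = (i * k).toNat + k.toNat := by
      have : (i + 1) * k = i * k + k := by ring
      omega
    rw [hinner, pvPrefix_get l ((i + 1) * k) (by positivity) hlen,
      pvPrefix_get l (i * k) hik (by nlinarith),
      hsub, List.take_add, List.sum_append]
    simp
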